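-- pv_equiv track=rewrite | github.com/damianfrench/best-description | textAnalysis.py | listing
-- ===== SOURCE A (Python) =====
-- def listing(Text):#returns the number of listed items in the text
--     lists=0
--     Comma=False
--     count=0
--     for x in range(len(Text)):
--         if Text[x][0]=="," and Comma==False:
--             Comma=True
--         elif Text[x][0]=="," and Comma==True:
--             count+=1
--         if Text[x][0]=="." or Text[x][0]==":" or Text[x][0]=="!":
--             Comma=False
--             if count>3:
--                 lists+=count+1
--                 count=0
--     return lists
-- ===== SOURCE B (Python) =====
-- def listing(Text):
--     # Two-pass: first split the token stream into segments ending at '.'/':'/'!'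
--     # tokens, recording each segment's comma count; then fold those counts.
--     segs = []
--     cur = 0
--     for tok in Text:
--         if tok[0] == ",":
--             cur += 1
--         elif tok[0] in ".:!":
--             segs.append(cur)
--             cur = 0
--     lists = 0
--     count = 0
--     for c in segs:
--         count += max(c - 1, 0)
--         if count > 3:
--             lists += count + 1
--             count = 0
--     return lists
-- ===== Notes on version B (the rewrite author's own statement) =====
-- stated objective: alternative
-- what changed: Replaces A's single pass with a stateful boolean Comma flag by a two-pass decomposition: pass 1 splits the token stream into segments ending at '.'/':'/'!' tokens and records each segment's comma count; pass 2 folds those counts, adding max(c-1,0) per segment and flushing when the running count exceeds 3.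
import Mathlib
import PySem

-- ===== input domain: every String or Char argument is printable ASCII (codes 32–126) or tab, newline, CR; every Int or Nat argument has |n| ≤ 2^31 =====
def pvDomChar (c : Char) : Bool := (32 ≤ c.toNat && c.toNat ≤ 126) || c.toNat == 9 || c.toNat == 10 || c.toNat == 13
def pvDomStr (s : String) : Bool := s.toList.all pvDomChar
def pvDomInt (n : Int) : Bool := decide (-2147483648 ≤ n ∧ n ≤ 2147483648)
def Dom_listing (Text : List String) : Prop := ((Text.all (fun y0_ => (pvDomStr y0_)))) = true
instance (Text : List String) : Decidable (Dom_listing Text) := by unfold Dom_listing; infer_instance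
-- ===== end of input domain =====

-- B replaces A's one-pass boolean-flag scan by a two-pass decomposition (segment comma
-- counts, then a fold over those counts); same cost, objective: alternative.

-- ===== PORT A =====
-- state = (lists, Comma, count), one step per token of the Python for-loop
def listingStepA (st : Int × Bool × Int) (tok : String) : Int × Bool × Int :=
  let c := PySem.Str.pyGet? tok 0
  let p : Bool × Int :=
    if c = some ',' ∧ st.2.1 = false then (true, st.2.2)
    else if c = some ',' ∧ st.2.1 = true then (st.2.1, st.2.2 + 1)
    else (st.2.1, st.2.2)
  if c = some '.' ∨ c = some ':' ∨ c = some '!' then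
    if p.2 > 3 then (st.1 + p.2 + 1, (false, 0)) else (st.1, (false, p.2))
  else (st.1, p)

def listing (Text : List String) : Int :=
  (Text.foldl listingStepA (0, false, 0)).1

-- ===== PORT B =====
-- pass 1: split into segments at '.'/':'/'!' tokens, collecting per-segment comma counts
def listingSegStep (st : List Int × Int) (tok : String) : List Int × Int :=
  if PySem.Str.pyGet? tok 0 = some ',' then (st.1, st.2 + 1)
  else if PySem.Str.pyGet? tok 0 = some '.' ∨ PySem.Str.pyGet? tok 0 = some ':'
        ∨ PySem.Str.pyGet? tok 0 = some '!' then (st.1 ++ [st.2], 0)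
  else st

-- pass 2: fold the segment comma counts
def listingCntStep (st : Int × Int) (c : Int) : Int × Int :=
  let count := st.2 + max (c - 1) 0
  if count > 3 then (st.1 + count + 1, 0) else (st.1, count)

def listing_alt (Text : List String) : Int :=
  let p := Text.foldl listingSegStep ([], 0)
  (p.1.foldl listingCntStep (0, 0)).1

-- ===== PRECONDITION & SPEC =====
-- Pre_ excludes empty-string tokens, on which A raises IndexError (Text[x][0]); B raises there too.
def Pre_listing (Text : List String) : Prop := ∀ s ∈ Text, s ≠ ""
instance (Text : List String) : Decidable (Pre_listing Text) := by unfold Pre_listing; infer_instance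
def pvWitness_listing : List String := ["a", ",", "b", ",", "c", ",", "d", ",", "e", ",", "."]
def Spec_listing (Text : List String) (out : Int) : Prop := out = listing_alt Text
instance (Text : List String) (out : Int) : Decidable (Spec_listing Text out) := by unfold Spec_listing; infer_instance

-- ===== CLAIM (what is proved, stated in full; the proofs are below) =====
def Claim_equal_listing : Prop := ∀ (Text : List String), Dom_listing Text → Pre_listing Text → Spec_listing Text (listing Text)

-- ===== LEMMAS AND PROOFS =====

-- abstraction: B's phase-1 state maps to A's loop state
def listingRel (st : List Int × Int) : Int × Bool × Int :=
  let q := st.1.foldl listingCntStep (0, 0)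
  (q.1, decide (0 < st.2), q.2 + max (st.2 - 1) 0)

lemma listingStep_comm (tok : String) (htok : tok ≠ "") (segs : List Int) (cur : Int)
    (hcur : 0 ≤ cur) :
    listingStepA (listingRel (segs, cur)) tok = listingRel (listingSegStep (segs, cur) tok) := by
  obtain ⟨ch, rest, h⟩ : ∃ ch rest, tok.toList = ch :: rest := by
    cases htl : tok.toList with
    | nil => exact absurd htl (by simp [String.toList_eq_nil_iff, htok])
    | cons c cs => exact ⟨c, cs, rfl⟩
  have hg : PySem.List.pyGet? tok.toList 0 = some ch := by
    rw [h]; simp [PySem.List.pyGet?, PySem.List.pyIdx?]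
  by_cases hc : ch = ','
  · subst hc
    by_cases h0 : cur = 0
    · subst h0
      simp [listingStepA, listingSegStep, listingRel, PySem.Str.pyGet?, hg]
    · have h1 : 0 < cur := lt_of_le_of_ne hcur (Ne.symm h0)
      simp [listingStepA, listingSegStep, listingRel, PySem.Str.pyGet?, hg, h1]
      refine ⟨hcur, ?_⟩
      rw [max_eq_left (by omega : (0:Int) ≤ cur - 1), max_eq_left hcur]
      ring
  · by_cases ht : ch = '.' ∨ ch = ':' ∨ ch = '!'
    · rcases ht with h' | h' | h' <;> subst h' <;>
        simp [listingStepA, listingSegStep, listingRel, listingCntStep, PySem.Str.pyGet?, hg,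
          List.foldl_append] <;> split <;> rfl
    · push_neg at ht
      simp [listingStepA, listingSegStep, listingRel, PySem.Str.pyGet?, hg, hc, ht.1, ht.2.1, ht.2.2]

lemma listingFold_comm (Text : List String) (hpre : ∀ s ∈ Text, s ≠ "") :
    ∀ (segs : List Int) (cur : Int), 0 ≤ cur →
    Text.foldl listingStepA (listingRel (segs, cur)) =
      listingRel (Text.foldl listingSegStep (segs, cur)) := by
  induction Text with
  | nil => intro segs cur _; rfl
  | cons tok Text ih =>
    intro segs cur hcur
    have htok : tok ≠ "" := hpre tok (by simp)
    have hrest : ∀ s ∈ Text, s ≠ "" := fun s hs => hpre s (by simp [hs])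
    rw [List.foldl_cons, listingStep_comm tok htok segs cur hcur, List.foldl_cons]
    have hstep : ∃ segs' cur', listingSegStep (segs, cur) tok = (segs', cur') ∧ 0 ≤ cur' := by
      unfold listingSegStep
      split
      · exact ⟨segs, cur + 1, rfl, by omega⟩
      · split
        · exact ⟨segs ++ [cur], 0, rfl, le_refl 0⟩
        · exact ⟨segs, cur, rfl, hcur⟩
    obtain ⟨segs', cur', heq, hcur'⟩ := hstep
    rw [heq]
    exact ih hrest segs' cur' hcur'

-- ===== VERDICT (by name: the statement is the Claim_ definition above) =====
theorem listing_spec : Claim_equal_listing := by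
  intro Text _ hpre
  unfold Spec_listing listing listing_alt
  have h0 : (0, false, 0) = listingRel ([], 0) := by
    simp [listingRel]
  rw [h0, listingFold_comm Text hpre [] 0 le_rfl]
  rfl
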